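-- pv_equiv track=rewrite | github.com/pypi-data/pypi-mirror-358 | packages/mouse2/mouse2-0.2.41.tar.gz/mouse2-0.2.41/copoly/block_boundaries.py | block_boundaries
-- ===== SOURCE A (Python) =====
-- def block_boundaries(sequence):
--     """Determine minimum and maximum index for each of the element types
--        present in the sequence"""
--
--     indexed_sequence = list(zip(range(len(sequence)), sequence))
--     element_types = list(set(sequence))
--     element_types.sort()
--     result = {}
--     for element_type in element_types:
--         minimum = [i[0] for i in indexed_sequence if i[1] == element_type][0]
--         maximum = [i[0] for i in indexed_sequence if i[1] == element_type][-1]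
--         result[element_type] = {'min' : minimum, 'max' : maximum}
--     return result
-- ===== SOURCE B (Python) =====
-- def block_boundaries(sequence):
--     bounds = {}
--     for i, x in enumerate(sequence):
--         if x in bounds:
--             bounds[x] = (bounds[x][0], i)
--         else:
--             bounds[x] = (i, i)
--     return {x: {'min': bounds[x][0], 'max': bounds[x][1]} for x in sorted(bounds)}
-- ===== Notes on version B (the rewrite author's own statement) =====
-- stated objective: faster
-- what changed: Replaces the per-type rescans of the whole indexed sequence (building the filtered index list twice per element type) with a single pass that records first/last index per type in a dict, then emits the keys in sorted order.
import Mathlib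
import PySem

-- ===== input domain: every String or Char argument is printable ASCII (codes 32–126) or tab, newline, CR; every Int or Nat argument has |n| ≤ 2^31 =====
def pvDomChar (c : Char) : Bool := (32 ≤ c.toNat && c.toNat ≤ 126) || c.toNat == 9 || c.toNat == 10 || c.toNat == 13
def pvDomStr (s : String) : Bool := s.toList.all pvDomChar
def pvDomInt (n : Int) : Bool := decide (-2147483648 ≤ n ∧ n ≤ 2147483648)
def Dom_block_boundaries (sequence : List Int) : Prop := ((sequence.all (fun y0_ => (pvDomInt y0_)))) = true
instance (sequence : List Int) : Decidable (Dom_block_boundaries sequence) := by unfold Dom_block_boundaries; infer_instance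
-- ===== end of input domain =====

-- B replaces A's per-type rescans of the indexed sequence with one pass recording
-- first/last index per type in a dict, then emits the keys in sorted order (objective: faster).

-- ===== PORT A =====
-- Literal port of A.  The comprehension indexings [0] and [-1] are PySem.List.pyGet? with
-- .getD 0: the filtered list is nonempty for every element_type drawn from set(sequence),
-- so the option is never none (Python never raises here) and A is total.
def block_boundaries (sequence : List Int) : List (Int × List (String × Int)) :=
  let indexed_sequence := (PySem.List.pyRange 0 (sequence.length : Int) 1).zip sequence
  let element_types := PySem.List.sorted (PySem.Set.ofList sequence) id
  (element_types.foldl (fun result element_type =>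
      let minimum := (PySem.List.pyGet?
        ((indexed_sequence.filter (fun i => i.2 == element_type)).map (fun i => i.1)) 0).getD 0
      let maximum := (PySem.List.pyGet?
        ((indexed_sequence.filter (fun i => i.2 == element_type)).map (fun i => i.1)) (-1)).getD 0
      PySem.Dict.insert result element_type [("min", minimum), ("max", maximum)])
    PySem.Dict.empty).items

-- ===== PORT B =====
def block_boundaries_alt (sequence : List Int) : List (Int × List (String × Int)) :=
  let bounds := (PySem.List.enumerate sequence).foldl (fun bounds ix =>
      if bounds.contains ix.2 then
        PySem.Dict.insert bounds ix.2 ((bounds.getD ix.2 (0, 0)).1, ix.1)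
      else
        PySem.Dict.insert bounds ix.2 (ix.1, ix.1))
    PySem.Dict.empty
  (PySem.List.sorted bounds.keys id).map (fun x =>
    (x, [("min", (bounds.getD x (0, 0)).1), ("max", (bounds.getD x (0, 0)).2)]))

-- ===== PRECONDITION & SPEC =====
def Spec_block_boundaries (sequence : List Int) (out : List (Int × List (String × Int))) : Prop := out = block_boundaries_alt sequence
instance (sequence : List Int) (out : List (Int × List (String × Int))) : Decidable (Spec_block_boundaries sequence out) := by unfold Spec_block_boundaries; infer_instance

-- ===== CLAIM (what is proved, stated in full; the proofs are below) =====
def Claim_equal_block_boundaries : Prop := ∀ (sequence : List Int), Dom_block_boundaries sequence → Spec_block_boundaries sequence (block_boundaries sequence)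

-- ===== LEMMAS AND PROOFS =====

-- the indexed sequence of A
def pvIdx (s : List Int) : List (Int × Int) := (PySem.List.pyRange 0 (s.length : Int) 1).zip s
-- indices where t occurs
def pvMatches (s : List Int) (t : Int) : List Int :=
  ((pvIdx s).filter (fun i => i.2 == t)).map (fun i => i.1)
def pvMin (s : List Int) (t : Int) : Int := (PySem.List.pyGet? (pvMatches s t) 0).getD 0
def pvMax (s : List Int) (t : Int) : Int := (PySem.List.pyGet? (pvMatches s t) (-1)).getD 0
def pvG (s : List Int) (t : Int) : Int × Int := (pvMin s t, pvMax s t)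
-- B's dict of (first, last) indices
def pvBounds (s : List Int) : PySem.Dict Int (Int × Int) :=
  (PySem.List.enumerate s).foldl (fun bounds ix =>
      if bounds.contains ix.2 then
        PySem.Dict.insert bounds ix.2 ((bounds.getD ix.2 (0, 0)).1, ix.1)
      else
        PySem.Dict.insert bounds ix.2 (ix.1, ix.1))
    PySem.Dict.empty

lemma pvIdx_append (s : List Int) (x : Int) :
    pvIdx (s ++ [x]) = pvIdx s ++ [((s.length : Int), x)] := by
  unfold pvIdx
  have h1 : ((s ++ [x]).length : Int) = ((s.length + 1 : Nat) : Int) := by simp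
  rw [h1, PySem.List.pyRange_zero_natCast, PySem.List.pyRange_zero_natCast,
    List.range_succ, List.map_append, List.zip_append (by simp)]
  simp

lemma pvMatches_append (s : List Int) (x t : Int) :
    pvMatches (s ++ [x]) t = pvMatches s t ++ (if x = t then [((s.length : Int))] else []) := by
  unfold pvMatches
  rw [pvIdx_append, List.filter_append, List.map_append]
  congr 1
  by_cases h : x = t <;> simp [h]

lemma pvMatches_nil_of_not_mem {s : List Int} {t : Int} (h : t ∉ s) : pvMatches s t = [] := by
  unfold pvMatches
  rw [List.map_eq_nil_iff, List.filter_eq_nil_iff]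
  intro p hp hb
  exact h (by simpa [beq_iff_eq.mp hb] using (List.of_mem_zip hp).2)

lemma pvIdx_length (s : List Int) : (pvIdx s).length = s.length := by
  simp [pvIdx, PySem.List.pyRange_zero_natCast]

lemma pvIdx_getElem (s : List Int) (i : Nat) (hi : i < (pvIdx s).length) :
    (pvIdx s)[i] = (((i : Nat) : Int), s[i]'(by rw [← pvIdx_length s]; exact hi)) := by
  simp [pvIdx, PySem.List.pyRange_zero_natCast, List.getElem_zip]

lemma pvMatches_ne_nil {s : List Int} {t : Int} (h : t ∈ s) : pvMatches s t ≠ [] := by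
  obtain ⟨i, hi, hget⟩ := List.mem_iff_getElem.mp h
  intro hnil
  unfold pvMatches at hnil
  rw [List.map_eq_nil_iff, List.filter_eq_nil_iff] at hnil
  have hb : i < (pvIdx s).length := by rw [pvIdx_length]; exact hi
  have hmem : (pvIdx s)[i] ∈ pvIdx s := List.getElem_mem hb
  have := hnil _ hmem
  rw [pvIdx_getElem] at this
  simp [hget] at this

lemma pvMin_append_of_mem {s : List Int} (x : Int) {t : Int} (h : t ∈ s) :
    pvMin (s ++ [x]) t = pvMin s t := by
  unfold pvMin
  rw [pvMatches_append, PySem.List.pyGet?_zero, PySem.List.pyGet?_zero,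
    List.getElem?_append_left (by
      rcases List.ne_nil_iff_length_pos.mp (pvMatches_ne_nil h) with hp
      omega)]

lemma pvMin_append_of_ne {s : List Int} {x t : Int} (h : t ≠ x) :
    pvMin (s ++ [x]) t = pvMin s t := by
  unfold pvMin
  rw [pvMatches_append, if_neg (fun hh => h hh.symm), List.append_nil]

lemma pvMax_append_of_ne {s : List Int} {x t : Int} (h : t ≠ x) :
    pvMax (s ++ [x]) t = pvMax s t := by
  unfold pvMax
  rw [pvMatches_append, if_neg (fun hh => h hh.symm), List.append_nil]

lemma pvMax_append_self (s : List Int) (x : Int) :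
    pvMax (s ++ [x]) x = (s.length : Int) := by
  unfold pvMax
  rw [pvMatches_append, if_pos rfl, PySem.List.pyGet?_neg_one_append_singleton]
  rfl

lemma pvMin_append_self_of_not_mem {s : List Int} {x : Int} (h : x ∉ s) :
    pvMin (s ++ [x]) x = (s.length : Int) := by
  unfold pvMin
  rw [pvMatches_append, if_pos rfl, pvMatches_nil_of_not_mem h]
  rfl

lemma pvBounds_append (s : List Int) (x : Int) :
    pvBounds (s ++ [x]) =
      if (pvBounds s).contains x then
        PySem.Dict.insert (pvBounds s) x (((pvBounds s).getD x (0, 0)).1, (s.length : Int))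
      else
        PySem.Dict.insert (pvBounds s) x ((s.length : Int), (s.length : Int)) := by
  unfold pvBounds
  rw [PySem.List.enumerate_append, List.foldl_append]
  have he : PySem.List.enumerate [x] (0 + (s.length : Int)) = [((s.length : Int), x)] := by
    simp [PySem.List.enumerate_cons, PySem.List.enumerate_nil]
  rw [he]
  rfl

lemma pvKeys_of_items {s : List Int}
    (h : (pvBounds s).items = (PySem.Set.ofList s).map (fun t => (t, pvG s t))) :
    (pvBounds s).keys = PySem.Set.ofList s := by
  unfold PySem.Dict.keys
  rw [h, List.map_map]
  simp [Function.comp_def]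

lemma pvBounds_items (s : List Int) :
    (pvBounds s).items = (PySem.Set.ofList s).map (fun t => (t, pvG s t)) := by
  induction s using List.reverseRecOn with
  | nil => rfl
  | append_singleton s x ih =>
    have hkeys : (pvBounds s).keys = PySem.Set.ofList s := pvKeys_of_items ih
    have hknd : (pvBounds s).keys.Nodup := hkeys ▸ PySem.Set.nodup_ofList s
    rw [pvBounds_append]
    by_cases hx : x ∈ s
    · have hcont : (pvBounds s).contains x = true := by
        rw [PySem.Dict.contains_eq_decide_mem_keys, hkeys]
        exact decide_eq_true ((PySem.Set.mem_ofList s x).mpr hx)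
      have hgd : (pvBounds s).getD x (0, 0) = pvG s x := by
        refine PySem.Dict.getD_of_mem_items _ ?_ hknd (0, 0)
        rw [ih]
        exact List.mem_map.mpr ⟨x, (PySem.Set.mem_ofList s x).mpr hx, rfl⟩
      rw [if_pos hcont, hgd]
      show (PySem.Dict.insert _ _ _).items = _
      rw [PySem.Dict.insert, if_pos hcont]
      show (pvBounds s).items.map _ = _
      rw [ih, List.map_map, PySem.Set.ofList_append_singleton, PySem.Set.add_of_mem
        ((PySem.Set.mem_ofList s x).mpr hx)]
      refine List.map_congr_left (fun t ht => ?_)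
      have hts : t ∈ s := (PySem.Set.mem_ofList s t).mp ht
      by_cases htx : t = x
      · subst htx
        simp only [Function.comp_apply]
        rw [if_pos (show (t == t) = true by simp)]
        unfold pvG
        rw [pvMin_append_of_mem t hts, pvMax_append_self]
      · simp only [Function.comp_apply]
        rw [if_neg (show ¬ (t == x) = true by simp [htx])]
        unfold pvG
        rw [pvMin_append_of_ne htx, pvMax_append_of_ne htx]
    · have hcont : (pvBounds s).contains x = false := by
        rw [PySem.Dict.contains_eq_decide_mem_keys, hkeys]
        exact decide_eq_false (fun hc => hx ((PySem.Set.mem_ofList s x).mp hc))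
      rw [if_neg (by rw [hcont]; exact Bool.false_ne_true)]
      show (PySem.Dict.insert _ _ _).items = _
      rw [PySem.Dict.insert, if_neg (by rw [hcont]; exact Bool.false_ne_true)]
      show (pvBounds s).items ++ _ = _
      rw [ih, PySem.Set.ofList_append_singleton, PySem.Set.add_of_not_mem
        (fun hc => hx ((PySem.Set.mem_ofList s x).mp hc)), List.map_append]
      congr 1
      · refine List.map_congr_left (fun t ht => ?_)
        have hts : t ∈ s := (PySem.Set.mem_ofList s t).mp ht
        have htx : t ≠ x := fun hh => hx (hh ▸ hts)
        unfold pvG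
        rw [pvMin_append_of_ne htx, pvMax_append_of_ne htx]
      · show _ = [(x, pvG (s ++ [x]) x)]
        unfold pvG
        rw [pvMin_append_self_of_not_mem hx, pvMax_append_self]

lemma pvFoldA (f : Int → List (String × Int)) (ts : List Int) (h : ts.Nodup) :
    (ts.foldl (fun r t => PySem.Dict.insert r t (f t)) PySem.Dict.empty).items
      = ts.map (fun t => (t, f t)) := by
  induction ts using List.reverseRecOn with
  | nil => rfl
  | append_singleton ts t ih =>
    rw [List.nodup_append] at h
    have hnd : ts.Nodup := h.1
    have hnm : t ∉ ts := fun hm => h.2.2 t hm t (List.mem_singleton_self t) rfl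
    rw [List.foldl_append]
    have hitems := ih hnd
    have hcont : (ts.foldl (fun r t => PySem.Dict.insert r t (f t)) PySem.Dict.empty).contains t
        = false := by
      unfold PySem.Dict.contains
      rw [hitems]
      simp only [List.any_eq_false]
      intro p hp
      obtain ⟨u, hu, rfl⟩ := List.mem_map.mp hp
      have hut : u ≠ t := fun hh => hnm (hh ▸ hu)
      simpa using hut
    show (PySem.Dict.insert _ _ _).items = _
    rw [PySem.Dict.insert, if_neg (by rw [hcont]; exact Bool.false_ne_true)]
    show (ts.foldl (fun r t => PySem.Dict.insert r t (f t)) PySem.Dict.empty).items ++ _ = _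
    rw [hitems, List.map_append]
    rfl

lemma pvSorted_nodup (s : List Int) : (PySem.List.sorted (PySem.Set.ofList s) id).Nodup := by
  have hp := PySem.List.sorted_perm (PySem.Set.ofList s) id false
  exact hp.nodup_iff.mpr (PySem.Set.nodup_ofList s)

-- ===== VERDICT (by name: the statement is the Claim_ definition above) =====
theorem block_boundaries_spec : Claim_equal_block_boundaries := by
  unfold Claim_equal_block_boundaries Spec_block_boundaries
  intro s _
  show block_boundaries s = block_boundaries_alt s
  unfold block_boundaries block_boundaries_alt
  rw [pvFoldA _ _ (pvSorted_nodup s)]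
  have hkeys : (pvBounds s).keys = PySem.Set.ofList s := pvKeys_of_items (pvBounds_items s)
  show _ = (PySem.List.sorted (pvBounds s).keys id).map (fun x =>
    (x, [("min", ((pvBounds s).getD x (0, 0)).1), ("max", ((pvBounds s).getD x (0, 0)).2)]))
  rw [hkeys]
  refine List.map_congr_left (fun t ht => ?_)
  have hts : t ∈ PySem.Set.ofList s :=
    (PySem.List.sorted_perm (PySem.Set.ofList s) id false).mem_iff.mp ht
  have hknd : (pvBounds s).keys.Nodup := hkeys ▸ PySem.Set.nodup_ofList s
  have hgd : (pvBounds s).getD t (0, 0) = pvG s t := by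
    refine PySem.Dict.getD_of_mem_items _ ?_ hknd (0, 0)
    rw [pvBounds_items]
    exact List.mem_map.mpr ⟨t, hts, rfl⟩
  show (t, _) = (t, _)
  rw [hgd]
  rfl
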